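-- pv_equiv track=rewrite | github.com/Xue-Yuan/LeetCode-Python | Line Reflection.py | isReflected
-- ===== SOURCE A (Python) =====
-- def isReflected(points):
--     """
--     :type points: List[List[int]]
--     :rtype: bool
--     """
--     if not points:
--         return True
--     twice_mid = min(points)[0] + max(points)[0]
--     s = set(map(tuple, points))
--     return all(
--         (twice_mid-x, y) in s
--         for x, y in points
--     )
-- ===== SOURCE B (Python) =====
-- def isReflected(points):
--     if not points:
--         return True
--     t = min(points)[0] + max(points)[0]
--     rows = {}
--     for x, y in points:
--         rows.setdefault(y, set()).add(x)
--     for xs in rows.values():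
--         arr = sorted(xs)
--         if [t - v for v in reversed(arr)] != arr:
--             return False
--     return True
-- ===== Notes on version B (the rewrite author's own statement) =====
-- stated objective: alternative
-- what changed: A tests every reflected point for membership in a hash set of all points; B groups the distinct x-values per y-row into a dict of sets and checks each row by comparing its sorted x-list with its mirror about the line, so no global point-set membership test remains.
-- outside the precondition, e.g. on isReflected([[-2, 4], [3, 6539], [7], [1884]]): A returns False, B raises ValueError
import Mathlib
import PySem

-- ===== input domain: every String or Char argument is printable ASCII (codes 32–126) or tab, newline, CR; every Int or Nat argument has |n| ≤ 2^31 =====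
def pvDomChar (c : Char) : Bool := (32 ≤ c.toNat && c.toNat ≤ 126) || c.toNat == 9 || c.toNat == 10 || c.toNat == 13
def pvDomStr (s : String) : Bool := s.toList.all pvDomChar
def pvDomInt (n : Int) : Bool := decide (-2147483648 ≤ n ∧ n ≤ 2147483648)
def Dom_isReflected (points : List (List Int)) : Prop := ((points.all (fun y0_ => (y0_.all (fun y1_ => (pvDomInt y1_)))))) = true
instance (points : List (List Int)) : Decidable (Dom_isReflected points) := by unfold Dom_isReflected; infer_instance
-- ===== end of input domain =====

-- B replaces A's hash-set membership test by grouping the x-values per y into a dict of sets and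
-- comparing each row's sorted distinct x-list with its mirror about the reflection line (alternative
-- decomposition, similar cost). Equivalence is about the return value; neither mutates its argument.

-- ===== PORT A =====
def isReflected (points : List (List Int)) : Bool :=
  if points = [] then true
  else
    match PySem.List.min? points (fun p => p), PySem.List.max? points (fun p => p) with
    | some mn, some mx =>
      let twice_mid := PySem.List.pyGetD mn 0 0 + PySem.List.pyGetD mx 0 0
      let s := PySem.Set.ofList points
      points.all (fun p =>
        PySem.Set.contains s [twice_mid - PySem.List.pyGetD p 0 0, PySem.List.pyGetD p 1 0])
    | _, _ => true

-- ===== PORT B =====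
def isReflected_alt (points : List (List Int)) : Bool :=
  if points = [] then true
  else
    match PySem.List.min? points (fun p => p) with
    | none => true
    | some mn =>
    match PySem.List.max? points (fun p => p) with
    | none => true
    | some mx =>
      let t := PySem.List.pyGetD mn 0 0 + PySem.List.pyGetD mx 0 0
      let rows : PySem.Dict Int (PySem.Set Int) :=
        points.foldl (fun d p =>
          d.modify (PySem.List.pyGetD p 1 0) PySem.Set.empty
            (fun s => PySem.Set.add s (PySem.List.pyGetD p 0 0))) PySem.Dict.empty
      rows.values.all (fun s =>
        let arr := PySem.List.sorted s (fun x => x)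
        (arr.reverse.map (fun v => t - v)) == arr)

-- ===== PRECONDITION & SPEC =====
-- Pre_ excludes inputs with a point that is not a 2-element list: on such inputs Python A raises
-- (IndexError on min(points)[0], ValueError unpacking 'for x, y in points') unless its lazy all()
-- happens to hit a missing reflection first and returns False, an accident of evaluation order;
-- B's grouping loop always reaches the malformed point and raises ValueError there.
def Pre_isReflected (points : List (List Int)) : Prop := ∀ p ∈ points, p.length = 2
instance (points : List (List Int)) : Decidable (Pre_isReflected points) := by unfold Pre_isReflected; infer_instance
def pvWitness_isReflected : List (List Int) := [[0, 1], [2, 1]]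
def Spec_isReflected (points : List (List Int)) (out : Bool) : Prop := out = isReflected_alt points
instance (points : List (List Int)) (out : Bool) : Decidable (Spec_isReflected points out) := by unfold Spec_isReflected; infer_instance

-- ===== CLAIM (what is proved, stated in full; the proofs are below) =====
def Claim_equal_isReflected : Prop := ∀ (points : List (List Int)), Dom_isReflected points → Pre_isReflected points → Spec_isReflected points (isReflected points)

-- ===== LEMMAS AND PROOFS =====

-- value of the grouping fold at a key c
theorem getD_group_fold (l : List (List Int)) (d : PySem.Dict Int (PySem.Set Int)) (c : Int) :
    (l.foldl (fun d p =>
        d.modify (PySem.List.pyGetD p 1 0) PySem.Set.empty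
          (fun s => PySem.Set.add s (PySem.List.pyGetD p 0 0))) d).getD c PySem.Set.empty
    = PySem.Set.update (d.getD c PySem.Set.empty)
        ((l.filter (fun p => PySem.List.pyGetD p 1 0 == c)).map (fun p => PySem.List.pyGetD p 0 0)) := by
  induction l generalizing d with
  | nil => simp [PySem.Set.update]
  | cons p l ih =>
    simp only [List.foldl_cons, List.filter_cons]
    rw [ih]
    by_cases h : PySem.List.pyGetD p 1 0 = c
    · subst h
      simp [PySem.Set.update_cons]
    · have hb : (PySem.List.pyGetD p 1 0 == c) = false := by simp [h]
      rw [hb]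
      simp only [Bool.false_eq_true, if_false]
      rw [PySem.Dict.getD_modify, if_neg (fun hc => h hc.symm)]

-- membership in a row's set
theorem mem_row_set (points : List (List Int)) (c x : Int) :
    x ∈ ((points.foldl (fun d p =>
        d.modify (PySem.List.pyGetD p 1 0) PySem.Set.empty
          (fun s => PySem.Set.add s (PySem.List.pyGetD p 0 0))) PySem.Dict.empty).getD c PySem.Set.empty)
    ↔ ∃ p ∈ points, PySem.List.pyGetD p 1 0 = c ∧ PySem.List.pyGetD p 0 0 = x := by
  rw [getD_group_fold]
  have : (PySem.Dict.empty : PySem.Dict Int (PySem.Set Int)).getD c PySem.Set.empty = PySem.Set.empty := by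
    simp [PySem.Dict.getD_empty]
  rw [this, PySem.Set.update_empty, PySem.Set.mem_ofList]
  simp only [List.mem_map, List.mem_filter, beq_iff_eq]
  constructor
  · rintro ⟨p, ⟨hp, hy⟩, hx⟩; exact ⟨p, hp, hy, hx⟩
  · rintro ⟨p, hp, hy, hx⟩; exact ⟨p, ⟨hp, hy⟩, hx⟩

-- the row's set is nodup
theorem nodup_row_set (points : List (List Int)) (c : Int) :
    ((points.foldl (fun d p =>
        d.modify (PySem.List.pyGetD p 1 0) PySem.Set.empty
          (fun s => PySem.Set.add s (PySem.List.pyGetD p 0 0))) PySem.Dict.empty).getD c PySem.Set.empty).Nodup := by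
  rw [getD_group_fold]
  have : (PySem.Dict.empty : PySem.Dict Int (PySem.Set Int)).getD c PySem.Set.empty = PySem.Set.empty := by
    simp [PySem.Dict.getD_empty]
  rw [this, PySem.Set.update_empty]
  exact PySem.Set.nodup_ofList _

-- a nodup set is closed under the mirror x ↦ t - x  iff  its sorted list equals its reversed mirror
theorem mirror_check (s : PySem.Set Int) (hnd : (s : List Int).Nodup) (t : Int) :
    (((PySem.List.sorted s (fun x => x)).reverse.map (fun v => t - v)) = PySem.List.sorted s (fun x => x))
    ↔ ∀ x ∈ (s : List Int), (t - x) ∈ (s : List Int) := by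
  set arr := PySem.List.sorted s (fun x : Int => x) with harr
  have hperm : arr.Perm s := PySem.List.sorted_perm s _ false
  have hmem : ∀ x : Int, x ∈ arr ↔ x ∈ (s : List Int) := fun x => hperm.mem_iff
  have hndarr : arr.Nodup := hperm.nodup_iff.mpr hnd
  have hle : arr.Pairwise (fun a b : Int => a ≤ b) := PySem.List.sorted_pairwise s _
  have hlt : arr.Pairwise (fun a b : Int => a < b) := by
    have := hle.and hndarr
    exact this.imp (fun {a b} h => lt_of_le_of_ne h.1 h.2)
  constructor
  · intro heq x hx
    have hxarr : x ∈ arr := (hmem x).mpr hx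
    rw [← heq] at hxarr
    rcases List.mem_map.mp hxarr with ⟨v, hv, hvx⟩
    have hvarr : v ∈ arr := List.mem_reverse.mp hv
    have hveq : t - x = v := by omega
    rw [hveq]
    exact (hmem v).mp hvarr
  · intro hclosed
    set m := arr.reverse.map (fun v => t - v) with hm
    have hmsub : m ⊆ arr := by
      intro x hx
      rcases List.mem_map.mp hx with ⟨v, hv, hvx⟩
      have : t - v ∈ (s : List Int) := hclosed v ((hmem v).mp (List.mem_reverse.mp hv))
      exact hvx ▸ ((hmem _).mpr this)
    have hmlt : m.Pairwise (fun a b : Int => a < b) := by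
      rw [hm, List.pairwise_map, List.pairwise_reverse]
      exact hlt.imp (fun {a b} h => by omega)
    have hmnd : m.Nodup := hmlt.imp (fun {a b} h => ne_of_lt h)
    have hlen : m.length = arr.length := by simp [hm]
    have hperm' : m.Perm arr := (hmnd.subperm hmsub).perm_of_length_le (le_of_eq hlen.symm)
    have := PySem.List.sorted_eq_of_perm_of_pairwise_lt s m (fun x => x) (hperm'.trans hperm) hmlt
    rw [harr]
    exact this.symm

-- ===== VERDICT (by name: the statement is the Claim_ definition above) =====
theorem isReflected_spec : Claim_equal_isReflected := by
  intro points hdom hpre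
  unfold Spec_isReflected isReflected isReflected_alt
  by_cases hnil : points = []
  · simp [hnil]
  · simp only [if_neg hnil]
    rcases hmn : PySem.List.min? points (fun p => p) with _ | mn
    · rfl
    rcases hmx : PySem.List.max? points (fun p => p) with _ | mx
    · rfl
    rw [← Bool.coe_iff_coe]
    simp only [List.all_eq_true, PySem.Set.contains_iff, PySem.Set.mem_ofList, beq_iff_eq]
    set t := PySem.List.pyGetD mn 0 0 + PySem.List.pyGetD mx 0 0 with ht
    set step := fun (d : PySem.Dict Int (PySem.Set Int)) (p : List Int) =>
      d.modify (PySem.List.pyGetD p 1 0) PySem.Set.empty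
        (fun s => PySem.Set.add s (PySem.List.pyGetD p 0 0)) with hstep
    have hndk : (points.foldl step PySem.Dict.empty).keys.Nodup := by
      rw [hstep]
      exact PySem.Dict.nodup_keys_foldl_modify_key points (fun p => PySem.List.pyGetD p 1 0)
        PySem.Set.empty (fun _ p s => PySem.Set.add s (PySem.List.pyGetD p 0 0)) PySem.Dict.empty
        (by simp [PySem.Dict.keys_empty])
    have hkeys : ∀ y : Int, y ∈ (points.foldl step PySem.Dict.empty).keys ↔
        ∃ p ∈ points, PySem.List.pyGetD p 1 0 = y := by
      intro y
      rw [hstep, PySem.Dict.keys_foldl_modify_key points (fun p => PySem.List.pyGetD p 1 0)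
        PySem.Set.empty (fun _ p s => PySem.Set.add s (PySem.List.pyGetD p 0 0)) PySem.Dict.empty,
        PySem.Dict.keys_empty, PySem.Set.update_nil_left, PySem.Set.mem_ofList, List.mem_map]
    rw [PySem.Dict.values_eq_map_keys _ hndk PySem.Set.empty]
    rw [List.forall_mem_map]
    constructor
    · -- A ⇒ B
      intro hA y hy
      rw [mirror_check _ (nodup_row_set points y) t]
      intro x hx
      rcases (mem_row_set points y x).mp hx with ⟨p, hp, hpy, hpx⟩
      rcases List.length_eq_two.mp (hpre p hp) with ⟨a, b, rfl⟩
      have ha : a = x := hpx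
      have hb : b = y := hpy
      subst ha; subst hb
      have := hA _ hp
      exact (mem_row_set points b (t - a)).mpr ⟨[t - a, b], this, rfl, rfl⟩
    · -- B ⇒ A
      intro hB p hp
      rcases List.length_eq_two.mp (hpre p hp) with ⟨a, b, rfl⟩
      have hy : b ∈ (points.foldl step PySem.Dict.empty).keys :=
        (hkeys b).mpr ⟨[a, b], hp, rfl⟩
      have hrow := hB b hy
      rw [mirror_check _ (nodup_row_set points b) t] at hrow
      have hx : a ∈ ((points.foldl step PySem.Dict.empty).getD b PySem.Set.empty : List Int) :=
        (mem_row_set points b a).mpr ⟨[a, b], hp, rfl, rfl⟩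
      rcases (mem_row_set points b (t - a)).mp (hrow a hx) with ⟨q, hq, hqy, hqx⟩
      rcases List.length_eq_two.mp (hpre q hq) with ⟨c, d, rfl⟩
      have hc : c = t - a := hqx
      have hd : d = b := hqy
      subst hc; subst hd
      exact hq
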